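-- pv_equiv track=rewrite | github.com/zhangshi0512/Leetcode | Data Structure + Algorithm/01 & 02 Array/LC2270_NumbersOfWaysToSplitArray.py | waysToSplitArray
-- ===== SOURCE A (Python) =====
-- def waysToSplitArray(nums):
--     # 初始化prefix sum数组的首位为原数组的首位
--     prefix = [nums[0]]
--     # 之后的每一位数都是prefix sum数组中的末位数加上当前的原数组
--     for i in range(1, len(nums)):
--         # 这样就得到了和原数组长度相同的prefix sum数组
--         prefix.append(prefix[-1] + nums[i])
--
--     ans = 0 # 初始化计数变量
--     # 开始遍历prefix sum数组, 注意条件要求左侧之和大于右侧之和。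
--     # 需要排除在末位的切分, 因为此时右侧为空集
--     for j in range(len(nums) - 1):
--         left = prefix[j]
--         right = prefix[-1] - left
--         if left >= right:
--             ans += 1
--
--     return ans
-- ===== SOURCE B (Python) =====
-- def waysToSplitArray(nums):
--     # Divide-and-conquer: both the total and the count of valid split points are
--     # computed by recursive halving on index ranges; running prefix context is
--     # threaded through the right half as `acc`.
--     def dc_sum(lo, hi):
--         if hi <= lo:
--             return 0
--         if hi - lo == 1:
--             return nums[lo]
--         mid = (lo + hi) // 2
--         return dc_sum(lo, mid) + dc_sum(mid, hi)
--
--     total = dc_sum(0, len(nums))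
--
--     def dc_count(lo, hi, acc):
--         # returns (sum(nums[lo:hi]), number of split indices j in [lo, hi)
--         # with 2 * (acc + sum(nums[lo:j+1])) >= total)
--         if hi <= lo:
--             return (0, 0)
--         if hi - lo == 1:
--             s = nums[lo]
--             return (s, 1 if 2 * (acc + s) >= total else 0)
--         mid = (lo + hi) // 2
--         s1, c1 = dc_count(lo, mid, acc)
--         s2, c2 = dc_count(mid, hi, acc + s1)
--         return (s1 + s2, c1 + c2)
--
--     return dc_count(0, len(nums) - 1, 0)[1]
-- ===== Notes on version B (the rewrite author's own statement) =====
-- stated objective: alternative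
-- what changed: B replaces A's sequential prefix-sum array build and second indexing pass by a divide-and-conquer recursion on index ranges: the total and the count of valid split points are each computed by recursive halving, threading the left-half sum into the right half as an accumulator, with no prefix array at all.
-- outside the precondition, e.g. on waysToSplitArray([]): A raises IndexError, B returns 0
-- crash fix: On the empty list A raises IndexError (it reads the first element before its loops); B's range recursion hits its empty-range base case and returns 0. — e.g. on waysToSplitArray([]): A raises IndexError, B returns 0
import Mathlib
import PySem

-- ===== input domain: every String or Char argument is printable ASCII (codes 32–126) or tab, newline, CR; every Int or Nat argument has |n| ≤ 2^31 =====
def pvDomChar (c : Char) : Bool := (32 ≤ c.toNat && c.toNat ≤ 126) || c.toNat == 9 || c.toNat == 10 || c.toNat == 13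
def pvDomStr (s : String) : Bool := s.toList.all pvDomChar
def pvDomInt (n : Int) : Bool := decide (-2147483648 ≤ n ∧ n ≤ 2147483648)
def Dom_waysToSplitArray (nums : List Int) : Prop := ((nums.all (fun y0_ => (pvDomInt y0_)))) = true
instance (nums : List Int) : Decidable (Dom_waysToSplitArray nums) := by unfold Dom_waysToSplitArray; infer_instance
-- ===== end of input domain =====

-- B replaces A's prefix-sum array (built left-to-right, then re-indexed) by a
-- divide-and-conquer recursion on index ranges; objective: alternative algorithm, same O(n) cost.

-- midpoint bounds, cited by name in the ports' decreasing_by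
theorem pvMid_bounds {lo hi : Int} (h : lo + 2 ≤ hi) :
    lo + 1 ≤ PySem.Int.floordiv (lo + hi) 2 ∧ PySem.Int.floordiv (lo + hi) 2 + 1 ≤ hi := by
  rw [PySem.Int.floordiv_eq_ediv_of_pos (by omega)]
  omega

-- ===== PORT A =====
-- prefix = [nums[0]]; for i in range(1, len(nums)): prefix.append(prefix[-1] + nums[i])
-- then: for j in range(len(nums)-1): left = prefix[j]; right = prefix[-1] - left; if left >= right: ans += 1
-- pyGetD is used for the indexing; Pre_ (nums ≠ []) keeps every index in range.
def waysToSplitArray (nums : List Int) : Int :=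
  let prefixL := (PySem.List.pyRange 1 (PySem.List.len nums) 1).foldl
      (fun p i => p ++ [PySem.List.pyGetD p (-1) 0 + PySem.List.pyGetD nums i 0])
      [PySem.List.pyGetD nums 0 0]
  (PySem.List.pyRange 0 (PySem.List.len nums - 1) 1).foldl
      (fun ans j =>
        let left := PySem.List.pyGetD prefixL j 0
        let right := PySem.List.pyGetD prefixL (-1) 0 - left
        if right ≤ left then ans + 1 else ans)
      0

-- ===== PORT B =====
-- def dc_sum(lo, hi): empty-range and singleton base cases, else recurse on the two halves
def dcSum (nums : List Int) (lo hi : Int) : Int :=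
  if _h1 : hi ≤ lo then 0
  else if _h2 : hi - lo = 1 then PySem.List.pyGetD nums lo 0
  else
    let mid := PySem.Int.floordiv (lo + hi) 2
    dcSum nums lo mid + dcSum nums mid hi
termination_by (hi - lo).toNat
decreasing_by
  · have h := pvMid_bounds (lo := lo) (hi := hi) (by omega); omega
  · have h := pvMid_bounds (lo := lo) (hi := hi) (by omega); omega

-- def dc_count(lo, hi, acc): returns (sum(nums[lo:hi]), count of valid split indices in [lo,hi))
def dcCount (nums : List Int) (total lo hi acc : Int) : Int × Int :=
  if _h1 : hi ≤ lo then (0, 0)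
  else if _h2 : hi - lo = 1 then
    let s := PySem.List.pyGetD nums lo 0
    (s, if total ≤ 2 * (acc + s) then 1 else 0)
  else
    let mid := PySem.Int.floordiv (lo + hi) 2
    let p1 := dcCount nums total lo mid acc
    let p2 := dcCount nums total mid hi (acc + p1.1)
    (p1.1 + p2.1, p1.2 + p2.2)
termination_by (hi - lo).toNat
decreasing_by
  · have h := pvMid_bounds (lo := lo) (hi := hi) (by omega); omega
  · have h := pvMid_bounds (lo := lo) (hi := hi) (by omega); omega

-- total = dc_sum(0, len(nums)); return dc_count(0, len(nums) - 1, 0)[1]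
def waysToSplitArray_alt (nums : List Int) : Int :=
  let total := dcSum nums 0 (PySem.List.len nums)
  (dcCount nums total 0 (PySem.List.len nums - 1) 0).2

-- ===== PRECONDITION & SPEC =====
-- A reads the first element before its loops, so it raises IndexError on the empty list; Pre_ excludes exactly that input.
def Pre_waysToSplitArray (nums : List Int) : Prop := nums ≠ []
instance (nums : List Int) : Decidable (Pre_waysToSplitArray nums) := by unfold Pre_waysToSplitArray; infer_instance
def pvWitness_waysToSplitArray : List Int := [10, 4, -8, 7]

-- On the empty list A raises IndexError (it reads the first element); B's range recursion returns 0.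
def Raises_waysToSplitArray (nums : List Int) : Prop := nums = []
instance (nums : List Int) : Decidable (Raises_waysToSplitArray nums) := by unfold Raises_waysToSplitArray; infer_instance
def pvRaiseWitness_waysToSplitArray : List Int := []
def pvRaiseWitnessOut_waysToSplitArray : Int := 0

def Spec_waysToSplitArray (nums : List Int) (out : Int) : Prop := out = waysToSplitArray_alt nums
instance (nums : List Int) (out : Int) : Decidable (Spec_waysToSplitArray nums out) := by unfold Spec_waysToSplitArray; infer_instance

-- ===== CLAIM (what is proved, stated in full; the proofs are below) =====
def Claim_equal_waysToSplitArray : Prop := ∀ (nums : List Int), Dom_waysToSplitArray nums → Pre_waysToSplitArray nums → Spec_waysToSplitArray nums (waysToSplitArray nums)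
def Claim_raises_waysToSplitArray : Prop := (∀ (nums : List Int), Dom_waysToSplitArray nums → Raises_waysToSplitArray nums → ¬ Pre_waysToSplitArray nums) ∧ (Dom_waysToSplitArray (pvRaiseWitness_waysToSplitArray) ∧ Raises_waysToSplitArray (pvRaiseWitness_waysToSplitArray) ∧ waysToSplitArray_alt (pvRaiseWitness_waysToSplitArray) = pvRaiseWitnessOut_waysToSplitArray)

-- ===== LEMMAS AND PROOFS =====

-- a counting loop is the sum of 0/1 indicators over the list it scans
theorem foldl_if_sum {α : Type} (P : α → Prop) [DecidablePred P] (l : List α) (c : Int) :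
    l.foldl (fun ans x => if P x then ans + 1 else ans) c
      = c + (l.map (fun x => if P x then (1:Int) else 0)).sum := by
  induction l generalizing c with
  | nil => simp
  | cons x t ih =>
    simp only [List.foldl_cons, List.map_cons, List.sum_cons]
    rw [ih]
    split_ifs <;> ring

-- A's prefix-building loop produces the list of prefix sums.
theorem buildA (nums : List Int) (h : nums ≠ []) (m : Nat) (h1 : 1 ≤ m) (hm : m ≤ nums.length) :
    (PySem.List.pyRange 1 (m : Int) 1).foldl
      (fun p i => p ++ [PySem.List.pyGetD p (-1) 0 + PySem.List.pyGetD nums i 0])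
      [PySem.List.pyGetD nums 0 0]
    = (List.range m).map (fun k => (nums.take (k+1)).sum) := by
  induction m with
  | zero => omega
  | succ m ih =>
    rcases Nat.lt_or_ge 1 (m+1) with hlt | hle
    · have hm' : 1 ≤ m := by omega
      have hmlt : m < nums.length := by omega
      have hcast : ((m : Int) + 1) = ((m + 1 : Nat) : Int) := by push_cast; ring
      rw [← hcast, PySem.List.pyRange_one_succ_right (by exact_mod_cast hm'),
        List.foldl_append, ih hm' (by omega)]
      simp only [List.foldl_cons, List.foldl_nil]
      conv_rhs => rw [List.range_succ, List.map_append]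
      congr 1
      obtain ⟨m', rfl⟩ : ∃ m', m = m' + 1 := ⟨m - 1, by omega⟩
      rw [show List.range (m' + 1) = List.range m' ++ [m'] from List.range_succ,
        List.map_append]
      simp only [List.map_cons, List.map_nil]
      rw [PySem.List.pyGetD_neg_one_append_singleton]
      have hx : PySem.List.pyGetD nums ((m' + 1 : Nat) : Int) 0 = nums[m' + 1]'hmlt := by
        rw [PySem.List.pyGetD_natCast]; exact List.getD_eq_getElem _ _ hmlt
      rw [hx]
      have : nums.take (m' + 1 + 1) = nums.take (m' + 1) ++ nums[m' + 1]?.toList :=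
        List.take_add_one
      rw [this, List.sum_append, List.getElem?_eq_getElem hmlt]
      simp
    · have : m = 0 := by omega
      subst this
      have : PySem.List.pyRange 1 ((1 : Nat) : Int) 1 = [] :=
        PySem.List.pyRange_one_eq_nil (by norm_num)
      rw [this]
      rcases nums with _ | ⟨a, t⟩
      · exact absurd rfl h
      · simp [PySem.List.pyGetD_zero_cons, List.range_succ]

-- the canonical count both programs compute
def cntSpec (nums : List Int) : Int :=
  ((List.range (nums.length - 1)).map
    (fun k => if nums.sum - (nums.take (k+1)).sum ≤ (nums.take (k+1)).sum then (1:Int) else 0)).sum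

-- A equals the canonical count on nonempty input
theorem A_eq_cnt (nums : List Int) (hpre : nums ≠ []) :
    waysToSplitArray nums = cntSpec nums := by
  have hn : 1 ≤ nums.length := List.length_pos_iff.mpr hpre
  simp only [waysToSplitArray, PySem.List.len_eq]
  simp only [buildA nums hpre nums.length hn le_rfl]
  have htot : PySem.List.pyGetD
      ((List.range nums.length).map (fun k => ((nums.take (k+1)).sum))) (-1) 0
      = nums.sum := by
    have hne : ((List.range nums.length).map (fun k => ((nums.take (k+1)).sum))) ≠ [] := by
      simp [← List.length_pos_iff]; omega
    rw [PySem.List.pyGetD_neg_one _ _ hne, List.getLast_eq_getElem]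
    simp only [List.length_map, List.length_range, List.getElem_map, List.getElem_range]
    rw [show nums.length - 1 + 1 = nums.length by omega, List.take_length]
  simp only [htot]
  have hcast : (nums.length : Int) - 1 = ((nums.length - 1 : Nat) : Int) := by omega
  rw [hcast, PySem.List.pyRange_zero_natCast, List.foldl_map]
  rw [PySem.List.foldl_congr_mem _ _
      (fun ans (k : Nat) => if nums.sum - (nums.take (k+1)).sum ≤ (nums.take (k+1)).sum
        then ans + 1 else ans) 0 ?side]
  case side =>
    intro acc k hk
    have hk' : k < nums.length - 1 := List.mem_range.mp hk
    have hget : PySem.List.pyGetD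
        ((List.range nums.length).map (fun k => ((nums.take (k+1)).sum))) ((k : Nat) : Int) 0
        = (nums.take (k+1)).sum := by
      rw [PySem.List.pyGetD_natCast]
      rw [List.getD_eq_getElem _ _ (by simp; omega)]
      simp
    simp only [hget]
  rw [foldl_if_sum (fun k : Nat => nums.sum - (nums.take (k+1)).sum ≤ (nums.take (k+1)).sum)]
  simp [cntSpec]

-- dcSum computes the segment sum
theorem dcSum_eq (nums : List Int) :
    ∀ (n : Nat) (lo hi : Int), (hi - lo).toNat ≤ n → 0 ≤ lo → lo ≤ hi → hi ≤ nums.length →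
      dcSum nums lo hi = (nums.take hi.toNat).sum - (nums.take lo.toNat).sum := by
  intro n
  induction n with
  | zero =>
    intro lo hi hfuel h0 hle hhi
    have : hi = lo := by omega
    subst this
    rw [dcSum]
    simp
  | succ n ih =>
    intro lo hi hfuel h0 hle hhi
    rw [dcSum]
    split_ifs with hA hB
    · have : hi = lo := by omega
      subst this; simp
    · -- singleton segment
      have hlt : lo.toNat < nums.length := by omega
      have hget : PySem.List.pyGetD nums lo 0 = nums.getD lo.toNat 0 := by
        rw [show lo = ((lo.toNat : Nat) : Int) by omega, PySem.List.pyGetD_natCast]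
        rw [Int.toNat_natCast]
      have hhi' : hi.toNat = lo.toNat + 1 := by omega
      rw [hget, List.getD_eq_getElem _ _ hlt, hhi', List.sum_take_succ _ _ hlt]
      ring
    · have h2 : lo + 2 ≤ hi := by omega
      obtain ⟨hm1, hm2⟩ := pvMid_bounds h2
      set mid := PySem.Int.floordiv (lo + hi) 2 with hmid
      dsimp only
      rw [ih lo mid (by omega) (by omega) (by omega) (by omega),
          ih mid hi (by omega) (by omega) (by omega) (by omega)]
      ring

-- dcCount computes the segment sum and the indicator count over the segment's split indices
theorem dcCount_eq (nums : List Int) (total : Int) :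
    ∀ (n : Nat) (lo hi acc : Int), (hi - lo).toNat ≤ n → 0 ≤ lo → lo ≤ hi → hi ≤ nums.length →
      dcCount nums total lo hi acc =
        ((nums.take hi.toNat).sum - (nums.take lo.toNat).sum,
         ((List.range (hi - lo).toNat).map (fun k =>
            if total ≤ 2 * (acc + (nums.take (lo.toNat + k + 1)).sum - (nums.take lo.toNat).sum)
            then (1:Int) else 0)).sum) := by
  intro n
  induction n with
  | zero =>
    intro lo hi acc hfuel h0 hle hhi
    have : hi = lo := by omega
    subst this
    rw [dcCount]
    simp
  | succ n ih =>
    intro lo hi acc hfuel h0 hle hhi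
    rw [dcCount]
    split_ifs with hA hB
    · have : hi = lo := by omega
      subst this; simp
    · -- singleton segment
      have hlt : lo.toNat < nums.length := by omega
      have hget : PySem.List.pyGetD nums lo 0 = nums.getD lo.toNat 0 := by
        rw [show lo = ((lo.toNat : Nat) : Int) by omega, PySem.List.pyGetD_natCast]
        rw [Int.toNat_natCast]
      have hone : (hi - lo).toNat = 1 := by omega
      have hhi' : hi.toNat = lo.toNat + 1 := by omega
      dsimp only
      rw [hget, List.getD_eq_getElem _ _ hlt, hone, hhi']
      simp only [List.range_one, List.map_cons, List.map_nil, List.sum_cons, List.sum_nil,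
        add_zero, Prod.mk.injEq]
      rw [List.sum_take_succ _ _ hlt]
      refine ⟨by ring, ?_⟩
      congr 2
      ring
    · have h2 : lo + 2 ≤ hi := by omega
      obtain ⟨hm1, hm2⟩ := pvMid_bounds h2
      set mid := PySem.Int.floordiv (lo + hi) 2 with hmid
      dsimp only
      rw [ih lo mid acc (by omega) (by omega) (by omega) (by omega)]
      rw [ih mid hi _ (by omega) (by omega) (by omega) (by omega)]
      simp only [Prod.mk.injEq]
      refine ⟨by ring, ?_⟩
      have hsplit : (hi - lo).toNat = (mid - lo).toNat + (hi - mid).toNat := by omega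
      rw [hsplit, List.range_add, List.map_append, List.sum_append, List.map_map]
      congr 1
      apply congrArg
      apply List.map_congr_left
      intro x hx
      have hidx : lo.toNat + ((mid - lo).toNat + x) + 1 = mid.toNat + x + 1 := by omega
      simp only [Function.comp, hidx]
      have harg : ∀ (px : Int),
          acc + ((nums.take mid.toNat).sum - (nums.take lo.toNat).sum)
            + px - (nums.take mid.toNat).sum
          = acc + px - (nums.take lo.toNat).sum := by intro px; ring
      rw [harg]

-- B equals the canonical count on nonempty input
theorem B_eq_cnt (nums : List Int) (hpre : nums ≠ []) :
    waysToSplitArray_alt nums = cntSpec nums := by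
  have hn : 1 ≤ nums.length := List.length_pos_iff.mpr hpre
  simp only [waysToSplitArray_alt, PySem.List.len_eq]
  rw [dcSum_eq nums nums.length 0 (nums.length : Int) (by omega) (by omega) (by omega) (by omega)]
  rw [dcCount_eq nums _ nums.length 0 ((nums.length : Int) - 1) 0
        (by omega) (by omega) (by omega) (by omega)]
  have hlen : ((nums.length : Int) - 1 - 0).toNat = nums.length - 1 := by omega
  have hlen' : ((nums.length : Int) - 1).toNat = nums.length - 1 := by omega
  simp only [Int.toNat_natCast, List.take_length, Int.toNat_zero, List.take_zero,
    List.sum_nil, sub_zero, zero_add, hlen', cntSpec]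
  apply congrArg
  apply List.map_congr_left
  intro k hk
  split_ifs with hc1 hc2 <;> first | rfl | omega

-- ===== VERDICT (by name: the statement is the Claim_ definition above) =====
theorem waysToSplitArray_spec : Claim_equal_waysToSplitArray := by
  intro nums _ hpre
  unfold Spec_waysToSplitArray
  rw [A_eq_cnt nums hpre, B_eq_cnt nums hpre]

@[simp] theorem waysToSplitArray_raises : Claim_raises_waysToSplitArray := by
  unfold Claim_raises_waysToSplitArray
  refine ⟨fun nums _ hr hp => hp hr, by decide, by decide, ?_⟩
  show waysToSplitArray_alt [] = 0
  simp only [waysToSplitArray_alt, PySem.List.len_eq, List.length_nil, Nat.cast_zero]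
  rw [dcCount]
  norm_num
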